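-- pv_equiv track=rewrite | github.com/rajlath/rkl_codes | codechef/KGP18ROL_PERIODCN.py | give_bin
-- ===== SOURCE A (Python) =====
-- def give_bin(n):
--     arr = []
--     for l in range(1,n+1):
--         each_m = n//l
--         for each in range(1,each_m+1):
--             s = ''
--             for i in range(l):
--                 if i%2==1:
--                     s += '0'*each
--                 else:
--                     s += '1'*each
--             arr.append(s)
--     return arr
-- ===== SOURCE B (Python) =====
-- def give_bin(n):
--     arr = []
--     for l in range(1, n + 1):
--         for each in range(1, n // l + 1):
--             pair = '1' * each + '0' * each
--             s = pair * (l // 2)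
--             if l % 2:
--                 s += '1' * each
--             arr.append(s)
--     return arr
-- ===== Notes on version B (the rewrite author's own statement) =====
-- stated objective: faster
-- what changed: The per-character inner loop over the l blocks is replaced by a closed-form period construction: build the unit ones-block plus zeros-block once, repeat it floor(l/2) times by string multiplication, and append one trailing ones-block when l is odd.
import Mathlib
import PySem

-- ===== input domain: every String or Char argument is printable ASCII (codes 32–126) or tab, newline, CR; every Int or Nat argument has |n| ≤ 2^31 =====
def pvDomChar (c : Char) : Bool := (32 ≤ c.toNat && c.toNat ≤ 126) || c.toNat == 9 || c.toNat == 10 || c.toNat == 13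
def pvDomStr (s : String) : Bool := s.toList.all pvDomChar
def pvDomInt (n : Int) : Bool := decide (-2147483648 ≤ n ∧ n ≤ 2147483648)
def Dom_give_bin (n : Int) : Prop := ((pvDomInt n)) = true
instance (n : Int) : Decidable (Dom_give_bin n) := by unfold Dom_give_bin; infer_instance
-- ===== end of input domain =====

-- B replaces the per-block inner loop by period repetition (pair*(l//2) + odd tail); return-value equivalence, no mutation involved.
-- ===== PORT A =====
def give_bin (n : Int) : List String :=
  (PySem.List.pyRange 1 (n + 1) 1).foldl (fun arr l =>
    let each_m := PySem.Int.floordiv n l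
    (PySem.List.pyRange 1 (each_m + 1) 1).foldl (fun arr each =>
      let s := (PySem.List.pyRange 0 l 1).foldl (fun s i =>
        if PySem.Int.mod i 2 = 1 then s ++ PySem.List.pyRepeat ['0'] each
        else s ++ PySem.List.pyRepeat ['1'] each) ([] : List Char)
      arr ++ [String.ofList s]) arr) []

-- ===== PORT B =====
def give_bin_alt (n : Int) : List String :=
  (PySem.List.pyRange 1 (n + 1) 1).foldl (fun arr l =>
    (PySem.List.pyRange 1 (PySem.Int.floordiv n l + 1) 1).foldl (fun arr each =>
      let pair := PySem.List.pyRepeat ['1'] each ++ PySem.List.pyRepeat ['0'] each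
      let s0 := PySem.List.pyRepeat pair (PySem.Int.floordiv l 2)
      let s := if PySem.Int.mod l 2 ≠ 0 then s0 ++ PySem.List.pyRepeat ['1'] each else s0
      arr ++ [String.ofList s]) arr) []

-- ===== PRECONDITION & SPEC =====
def Spec_give_bin (n : Int) (out : List String) : Prop := out = give_bin_alt n
instance (n : Int) (out : List String) : Decidable (Spec_give_bin n out) := by unfold Spec_give_bin; infer_instance

-- ===== CLAIM (what is proved, stated in full; the proofs are below) =====
def Claim_equal_give_bin : Prop := ∀ (n : Int), Dom_give_bin n → Spec_give_bin n (give_bin n)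

-- ===== LEMMAS AND PROOFS =====

-- ===== VERDICT (by name: the statement is the Claim_ definition above) =====
-- core: the alternating block loop of A equals B's period construction, stated over Nat
theorem block_loop_eq (ones zeros : List Char) (L : Nat) :
    (List.range L).foldl (fun s k =>
        if k % 2 = 1 then s ++ zeros else s ++ ones) [] =
      (List.replicate (L / 2) (ones ++ zeros)).flatten ++
        (if L % 2 = 1 then ones else []) := by
  induction L with
  | zero => simp
  | succ L ih =>
    rw [List.range_succ, List.foldl_append, ih]
    rcases Nat.even_or_odd L with h | h
    · have h2 : L % 2 = 0 := Nat.even_iff.mp h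
      have : (L + 1) % 2 = 1 := by omega
      have hdiv : (L + 1) / 2 = L / 2 := by omega
      simp [h2, this, hdiv]
    · have h2 : L % 2 = 1 := Nat.odd_iff.mp h
      have : (L + 1) % 2 = 0 := by omega
      have hdiv : (L + 1) / 2 = L / 2 + 1 := by omega
      simp [h2, this, hdiv, List.replicate_succ', List.flatten_append]

theorem inner_string_eq (l each : Int) (hl : 0 ≤ l) :
    (PySem.List.pyRange 0 l 1).foldl (fun s i =>
        if PySem.Int.mod i 2 = 1 then s ++ PySem.List.pyRepeat ['0'] each
        else s ++ PySem.List.pyRepeat ['1'] each) ([] : List Char) =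
      (let pair := PySem.List.pyRepeat ['1'] each ++ PySem.List.pyRepeat ['0'] each
       let s0 := PySem.List.pyRepeat pair (PySem.Int.floordiv l 2)
       if PySem.Int.mod l 2 ≠ 0 then s0 ++ PySem.List.pyRepeat ['1'] each else s0) := by
  have hmod : ∀ (k : Nat), PySem.Int.mod ((k : Int)) 2 = ((k % 2 : Nat) : Int) := by
    intro k
    show ((k : Int)).fmod 2 = _
    rw [Int.fmod_eq_emod]
    simp
  rw [PySem.List.pyRange_one, List.foldl_map]
  have hL : (l - 0).toNat = l.toNat := by omega
  rw [hL]
  have := block_loop_eq (PySem.List.pyRepeat ['1'] each) (PySem.List.pyRepeat ['0'] each) l.toNat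
  rw [show (fun (s : List Char) (k : Nat) =>
      if PySem.Int.mod (0 + (k : Int)) 2 = 1 then s ++ PySem.List.pyRepeat ['0'] each
      else s ++ PySem.List.pyRepeat ['1'] each) = (fun s k =>
      if k % 2 = 1 then s ++ PySem.List.pyRepeat ['0'] each
      else s ++ PySem.List.pyRepeat ['1'] each) from by
    funext s k
    rw [zero_add, hmod]
    rcases Nat.mod_two_eq_zero_or_one k with h | h <;> simp [h]]
  rw [this]
  -- relate Nat-side division/parity with PySem.Int on a nonnegative l
  have hfd : (PySem.Int.floordiv l 2).toNat = l.toNat / 2 := by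
    show (l.fdiv 2).toNat = _
    rw [Int.fdiv_eq_ediv]
    simp
    omega
  have hpm : PySem.Int.mod l 2 = (l.toNat % 2 : Nat) := by
    show l.fmod 2 = _
    rw [Int.fmod_eq_emod]
    simp
    omega
  simp only [hpm, PySem.List.pyRepeat, hfd]
  rcases Nat.mod_two_eq_zero_or_one l.toNat with h | h <;> simp [h]

theorem give_bin_spec : Claim_equal_give_bin := by
  intro n _
  unfold Spec_give_bin give_bin give_bin_alt
  refine PySem.List.foldl_congr_mem _ _ _ _ ?_
  intro arr l hlmem
  have hl : 1 ≤ l := (PySem.List.mem_pyRange_one.mp hlmem).1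
  refine PySem.List.foldl_congr_mem _ _ _ _ ?_
  intro arr2 each _
  rw [inner_string_eq l each (by omega)]
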